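-- pv_equiv track=rewrite | github.com/JulianaSalfity/python | parcial2final.py | stock_productos
-- ===== SOURCE A (Python) =====
-- def buscar_maximo(s:list[int]) -> int:
--     max: int = 0
--     for n in s:
--         if n >= max:
--             max = n
--     return max
--
-- def buscar_minimo(s:list[int]) -> int:
--     min: int = s[0]
--     for n in s:
--         if n <= min:
--             min = n
--     return min
--
-- def stock_productos(stock_cambios:list[(str,int)]) -> dict[str,(int,int)]:
--     dict_productos_aux: dict = {}
--     dict_productos: dict = {}
--     for producto in stock_cambios:
--         objeto: str = producto[0]
--         cantidad: int = producto[1]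
--         if not objeto in dict_productos_aux:
--             dict_productos_aux[objeto] = []
--         dict_productos_aux[objeto].append(cantidad)
--     for k,v in dict_productos_aux.items():
--         maximo: int= buscar_maximo(v)
--         minimo: int = buscar_minimo(v)
--         dict_productos[k] = (minimo, maximo)
--     return dict_productos
-- ===== SOURCE B (Python) =====
-- def stock_productos(stock_cambios):
--     minimos = {}
--     maximos = {}
--     for producto, cantidad in stock_cambios:
--         minimos[producto] = min(minimos.get(producto, cantidad), cantidad)
--         maximos[producto] = max(maximos.get(producto, 0), cantidad)
--     return {producto: (minimos[producto], maximos[producto]) for producto in minimos}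
-- ===== Notes on version B (the rewrite author's own statement) =====
-- stated objective: simpler
-- what changed: One pass keeping two flat dicts of running per-product minimum (seeded from the first quantity via .get default) and running per-product maximum over a 0 baseline, zipped at the end; no grouped quantity lists and no helper scan functions.
import Mathlib
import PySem

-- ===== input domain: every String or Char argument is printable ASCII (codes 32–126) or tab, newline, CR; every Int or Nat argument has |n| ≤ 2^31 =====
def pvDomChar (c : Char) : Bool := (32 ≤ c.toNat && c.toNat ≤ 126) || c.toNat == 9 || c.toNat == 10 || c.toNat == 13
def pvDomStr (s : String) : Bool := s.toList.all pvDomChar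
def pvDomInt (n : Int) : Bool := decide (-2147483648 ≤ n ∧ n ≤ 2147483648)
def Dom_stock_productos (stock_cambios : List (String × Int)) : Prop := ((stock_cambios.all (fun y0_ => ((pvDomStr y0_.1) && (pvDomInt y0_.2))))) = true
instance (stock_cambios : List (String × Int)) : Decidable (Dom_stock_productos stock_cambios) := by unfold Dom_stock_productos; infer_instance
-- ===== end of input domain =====

-- B keeps two flat dicts of running per-product minimum and maximum in one pass and
-- zips them at the end, instead of grouping quantities into lists and scanning each
-- group with helper functions: simpler, no aux lists.


-- ===== PORT A =====
def buscar_maximo (s : List Int) : Int :=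
  s.foldl (fun max n => if n ≥ max then n else max) 0

-- 'min: int = s[0]' raises IndexError on s = []; stock_productos only calls this on
-- nonempty per-product group lists, so the .getD 0 default on the empty case is unreachable.
def buscar_minimo (s : List Int) : Int :=
  s.foldl (fun min n => if n ≤ min then n else min) ((PySem.List.pyGet? s 0).getD 0)

def stock_productos (stock_cambios : List (String × Int)) : List (String × Int × Int) :=
  let dict_productos_aux : PySem.Dict String (List Int) :=
    stock_cambios.foldl (fun d producto =>
      let objeto := producto.1
      let cantidad := producto.2
      let d := if d.contains objeto then d else d.insert objeto []
      d.modify objeto [] (fun v => v ++ [cantidad])) PySem.Dict.empty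
  let dict_productos : PySem.Dict String (Int × Int) :=
    dict_productos_aux.items.foldl (fun dp kv =>
      let maximo := buscar_maximo kv.2
      let minimo := buscar_minimo kv.2
      dp.insert kv.1 (minimo, maximo)) PySem.Dict.empty
  dict_productos.items

-- ===== PORT B =====
def stock_productos_alt (stock_cambios : List (String × Int)) : List (String × Int × Int) :=
  let st : PySem.Dict String Int × PySem.Dict String Int :=
    stock_cambios.foldl (fun st p =>
      (st.1.insert p.1 (min (st.1.getD p.1 p.2) p.2),
       st.2.insert p.1 (max (st.2.getD p.1 0) p.2))) (PySem.Dict.empty, PySem.Dict.empty)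
  let minimos := st.1
  let maximos := st.2
  -- 'maximos[producto]': the key is always present (both dicts get the same keys),
  -- so the .getD 0 default is unreachable.
  (minimos.items.foldl (fun (d : PySem.Dict String (Int × Int)) kv =>
      d.insert kv.1 (kv.2, maximos.getD kv.1 0)) PySem.Dict.empty).items

-- ===== PRECONDITION & SPEC =====
def Spec_stock_productos (stock_cambios : List (String × Int)) (out : List (String × Int × Int)) : Prop := out = stock_productos_alt stock_cambios
instance (stock_cambios : List (String × Int)) (out : List (String × Int × Int)) : Decidable (Spec_stock_productos stock_cambios out) := by unfold Spec_stock_productos; infer_instance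

-- ===== CLAIM (what is proved, stated in full; the proofs are below) =====
def Claim_equal_stock_productos : Prop := ∀ (stock_cambios : List (String × Int)), Dom_stock_productos stock_cambios → Spec_stock_productos stock_cambios (stock_productos stock_cambios)

-- ===== LEMMAS AND PROOFS =====

-- quantities recorded for product k, in order
def pvGrp (k : String) (sc : List (String × Int)) : List Int :=
  (sc.filter (fun p => p.1 == k)).map (·.2)

-- the canonical result both ports compute
def pvCanon (sc : List (String × Int)) : List (String × Int × Int) :=
  (PySem.Set.ofList (sc.map (·.1))).map
    (fun k => (k, buscar_minimo (pvGrp k sc), buscar_maximo (pvGrp k sc)))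

theorem pvGrp_append (k : String) (sc : List (String × Int)) (p : String × Int) :
    pvGrp k (sc ++ [p]) = pvGrp k sc ++ (if p.1 = k then [p.2] else []) := by
  simp [pvGrp, List.filter_append]
  split_ifs with h <;> simp [h]

theorem pvGrp_nil_of_not_mem (k : String) (sc : List (String × Int))
    (h : k ∉ sc.map (·.1)) : pvGrp k sc = [] := by
  simp only [pvGrp, List.map_eq_nil_iff, List.filter_eq_nil_iff]
  intro p hp hpk
  exact h (List.mem_map.mpr ⟨p, hp, by simpa using hpk⟩)

theorem pvGrp_ne_nil_of_mem (k : String) (sc : List (String × Int))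
    (h : k ∈ sc.map (·.1)) : pvGrp k sc ≠ [] := by
  obtain ⟨p, hp, hpk⟩ := List.mem_map.mp h
  simp only [pvGrp, ne_eq, List.map_eq_nil_iff, List.filter_eq_nil_iff, not_forall]
  exact ⟨p, hp, by simp [hpk]⟩

theorem buscar_maximo_append (g : List Int) (c : Int) :
    buscar_maximo (g ++ [c]) = max (buscar_maximo g) c := by
  simp only [buscar_maximo, List.foldl_append, List.foldl_cons, List.foldl_nil]
  split_ifs <;> omega

theorem buscar_maximo_single (c : Int) : buscar_maximo [c] = max 0 c := by
  simp only [buscar_maximo, List.foldl_cons, List.foldl_nil]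
  split_ifs <;> omega

theorem buscar_minimo_single (c : Int) : buscar_minimo [c] = c := by
  simp [buscar_minimo, PySem.List.pyGet?, PySem.List.pyIdx?]

theorem buscar_minimo_append (g : List Int) (c : Int) (hg : g ≠ []) :
    buscar_minimo (g ++ [c]) = min (buscar_minimo g) c := by
  obtain ⟨h, t, rfl⟩ := List.exists_cons_of_ne_nil hg
  simp only [buscar_minimo, List.cons_append, List.foldl_append, List.foldl_cons,
    List.foldl_nil]
  have h0 : ∀ (l : List Int), PySem.List.pyGet? (h :: l) (0 : Int) = some h := by
    intro l
    rw [show (0 : Int) = ((0 : ℕ) : Int) from rfl, PySem.List.pyGet?_natCast]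
    rfl
  rw [h0, h0]
  split_ifs <;> omega

-- ----- A computes the canonical result -----

-- A's grouping step equals a plain dict-modify step
theorem pvStepA_eq (d : PySem.Dict String (List Int)) (k : String) (c : Int) :
    (if d.contains k then d else d.insert k []).modify k [] (fun v => v ++ [c])
      = d.modify k [] (fun v => v ++ [c]) := by
  by_cases h : d.contains k
  · simp [h]
  · simp only [h, Bool.false_eq_true, if_false, PySem.Dict.modify]
    rw [PySem.Dict.getD_insert_self, PySem.Dict.insert_insert_self,
      PySem.Dict.getD_of_not_contains d [] (by simpa using h)]

def aux_t (sc : List (String × Int)) : PySem.Dict String (List Int) :=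
  sc.foldl (fun d p => d.modify p.1 [] (fun v => v ++ [p.2])) PySem.Dict.empty

theorem pvA_canon (sc : List (String × Int)) : stock_productos sc = pvCanon sc := by
  have haux : sc.foldl (fun d producto =>
      let objeto := producto.1
      let cantidad := producto.2
      let d := if d.contains objeto then d else d.insert objeto []
      d.modify objeto [] (fun v => v ++ [cantidad])) PySem.Dict.empty = aux_t sc := by
    apply PySem.List.foldl_congr_mem
    intro d p _
    exact pvStepA_eq d p.1 p.2
  unfold stock_productos
  rw [haux]
  show ((aux_t sc).items.foldl (fun dp kv =>
      dp.insert kv.1 (buscar_minimo kv.2, buscar_maximo kv.2)) PySem.Dict.empty).items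
    = pvCanon sc
  have hkeys : (aux_t sc).keys = PySem.Set.ofList (sc.map (·.1)) := by
    rw [aux_t, PySem.Dict.keys_foldl_modify_key]
    simp [PySem.Dict.keys, PySem.Dict.empty, PySem.Set.update_nil_left]
  have hnd : (aux_t sc).keys.Nodup := by rw [hkeys]; exact PySem.Set.nodup_ofList _
  have hgetD : ∀ k, (aux_t sc).getD k [] = pvGrp k sc := by
    intro k
    rw [aux_t, PySem.Dict.getD_foldl_modify_append]
    simp [pvGrp, PySem.Dict.getD_empty]
  have hitems : (aux_t sc).items = (aux_t sc).keys.map (fun k => (k, (aux_t sc).getD k [])) :=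
    PySem.Dict.items_eq_map_keys (aux_t sc) hnd []
  have hfresh : (List.foldl (fun (dp : PySem.Dict String (Int × Int)) (kv : String × List Int) =>
        dp.insert kv.1 (buscar_minimo kv.2, buscar_maximo kv.2)) PySem.Dict.empty
        (aux_t sc).items).items
      = PySem.Dict.empty.items
        ++ (aux_t sc).items.map (fun kv => (kv.1, (buscar_minimo kv.2, buscar_maximo kv.2))) :=
    PySem.Dict.items_foldl_insert_fresh _ _ _ _
      (fun a _ => PySem.Dict.contains_empty a.1)
      (by rw [show (aux_t sc).items.map (fun kv : String × List Int => kv.1)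
                = (aux_t sc).keys from rfl]
          exact hnd)
  rw [hfresh, hitems]
  simp only [PySem.Dict.empty, List.nil_append, List.map_map, pvCanon, ← hkeys]
  apply List.map_congr_left
  intro k hk
  simp [Function.comp, hgetD k]

-- ----- B computes the canonical result -----

def pvMinFold (sc : List (String × Int)) : PySem.Dict String Int :=
  sc.foldl (fun m p => m.insert p.1 (min (m.getD p.1 p.2) p.2)) PySem.Dict.empty

def pvMaxFold (sc : List (String × Int)) : PySem.Dict String Int :=
  sc.foldl (fun m p => m.insert p.1 (max (m.getD p.1 0) p.2)) PySem.Dict.empty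

-- B's single pass over a pair of dicts is the two component folds
theorem pvPairFold (sc : List (String × Int)) :
    sc.foldl (fun (st : PySem.Dict String Int × PySem.Dict String Int) p =>
        (st.1.insert p.1 (min (st.1.getD p.1 p.2) p.2),
         st.2.insert p.1 (max (st.2.getD p.1 0) p.2))) (PySem.Dict.empty, PySem.Dict.empty)
      = (pvMinFold sc, pvMaxFold sc) := by
  suffices h : ∀ (m x : PySem.Dict String Int),
      sc.foldl (fun (st : PySem.Dict String Int × PySem.Dict String Int) p =>
        (st.1.insert p.1 (min (st.1.getD p.1 p.2) p.2),
         st.2.insert p.1 (max (st.2.getD p.1 0) p.2))) (m, x)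
      = (sc.foldl (fun m p => m.insert p.1 (min (m.getD p.1 p.2) p.2)) m,
         sc.foldl (fun x p => x.insert p.1 (max (x.getD p.1 0) p.2)) x) by
    exact h _ _
  induction sc with
  | nil => intro m x; rfl
  | cons p t ih => intro m x; simp only [List.foldl_cons]; exact ih _ _

theorem pvMin_get? (sc : List (String × Int)) (k : String) :
    (pvMinFold sc).get? k
      = if k ∈ sc.map (·.1) then some (buscar_minimo (pvGrp k sc)) else none := by
  induction sc using List.reverseRecOn with
  | nil => simp [pvMinFold, PySem.Dict.get?_empty]
  | append_singleton sc p ih =>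
    have hstep : pvMinFold (sc ++ [p])
        = (pvMinFold sc).insert p.1 (min ((pvMinFold sc).getD p.1 p.2) p.2) := by
      simp [pvMinFold, List.foldl_append]
    rw [hstep, PySem.Dict.get?_insert]
    by_cases hk : k = p.1
    · rw [if_pos hk]
      have hm2 : k ∈ List.map (fun x => x.1) (sc ++ [p]) := by simp [hk]
      rw [if_pos hm2]
      by_cases hmem : k ∈ sc.map (·.1)
      · have hgd : (pvMinFold sc).getD p.1 p.2 = buscar_minimo (pvGrp k sc) := by
          rw [← hk, PySem.Dict.getD_eq_get?_getD, ih, if_pos hmem]; rfl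
        have hgrp : pvGrp k (sc ++ [p]) = pvGrp k sc ++ [p.2] := by
          rw [pvGrp_append]; simp [hk.symm]
        rw [hgd, hgrp, buscar_minimo_append _ _ (pvGrp_ne_nil_of_mem k sc hmem)]
      · have hgd : (pvMinFold sc).getD p.1 p.2 = p.2 := by
          rw [← hk, PySem.Dict.getD_eq_get?_getD, ih, if_neg hmem]; rfl
        have hgrp : pvGrp k (sc ++ [p]) = [p.2] := by
          rw [pvGrp_append, pvGrp_nil_of_not_mem k sc hmem]; simp [hk.symm]
        rw [hgd, hgrp, buscar_minimo_single]
        simp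
    · have hpk : ¬ (p.1 = k) := fun h => hk h.symm
      have hmm : k ∈ List.map (fun x => x.1) sc ↔ k ∈ List.map (fun x => x.1) (sc ++ [p]) := by
        simp [hk]
      rw [if_neg hk, ih]
      have hgrp : pvGrp k (sc ++ [p]) = pvGrp k sc := by
        rw [pvGrp_append]; simp [hpk]
      rw [hgrp]
      exact if_congr hmm rfl rfl

theorem pvMax_get? (sc : List (String × Int)) (k : String) :
    (pvMaxFold sc).get? k
      = if k ∈ sc.map (·.1) then some (buscar_maximo (pvGrp k sc)) else none := by
  induction sc using List.reverseRecOn with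
  | nil => simp [pvMaxFold, PySem.Dict.get?_empty]
  | append_singleton sc p ih =>
    have hstep : pvMaxFold (sc ++ [p])
        = (pvMaxFold sc).insert p.1 (max ((pvMaxFold sc).getD p.1 0) p.2) := by
      simp [pvMaxFold, List.foldl_append]
    rw [hstep, PySem.Dict.get?_insert]
    by_cases hk : k = p.1
    · rw [if_pos hk]
      have hm2 : k ∈ List.map (fun x => x.1) (sc ++ [p]) := by simp [hk]
      rw [if_pos hm2]
      by_cases hmem : k ∈ sc.map (·.1)
      · have hgd : (pvMaxFold sc).getD p.1 0 = buscar_maximo (pvGrp k sc) := by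
          rw [← hk, PySem.Dict.getD_eq_get?_getD, ih, if_pos hmem]; rfl
        have hgrp : pvGrp k (sc ++ [p]) = pvGrp k sc ++ [p.2] := by
          rw [pvGrp_append]; simp [hk.symm]
        rw [hgd, hgrp, buscar_maximo_append]
      · have hgd : (pvMaxFold sc).getD p.1 0 = 0 := by
          rw [← hk, PySem.Dict.getD_eq_get?_getD, ih, if_neg hmem]; rfl
        have hgrp : pvGrp k (sc ++ [p]) = [p.2] := by
          rw [pvGrp_append, pvGrp_nil_of_not_mem k sc hmem]; simp [hk.symm]
        rw [hgd, hgrp, buscar_maximo_single]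
    · have hpk : ¬ (p.1 = k) := fun h => hk h.symm
      have hmm : k ∈ List.map (fun x => x.1) sc ↔ k ∈ List.map (fun x => x.1) (sc ++ [p]) := by
        simp [hk]
      rw [if_neg hk, ih]
      have hgrp : pvGrp k (sc ++ [p]) = pvGrp k sc := by
        rw [pvGrp_append]; simp [hpk]
      rw [hgrp]
      exact if_congr hmm rfl rfl

theorem pvMin_keys (sc : List (String × Int)) :
    (pvMinFold sc).keys = PySem.Set.ofList (sc.map (·.1)) := by
  rw [pvMinFold, PySem.Dict.keys_foldl_insert_key]
  simp [PySem.Dict.keys, PySem.Dict.empty, PySem.Set.update_nil_left]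

theorem pvB_canon (sc : List (String × Int)) : stock_productos_alt sc = pvCanon sc := by
  unfold stock_productos_alt
  rw [pvPairFold]
  show ((pvMinFold sc).items.foldl (fun (d : PySem.Dict String (Int × Int)) kv =>
      d.insert kv.1 (kv.2, (pvMaxFold sc).getD kv.1 0)) PySem.Dict.empty).items = pvCanon sc
  have hnd : (pvMinFold sc).keys.Nodup := by
    rw [pvMin_keys]; exact PySem.Set.nodup_ofList _
  have hitems : (pvMinFold sc).items
      = (pvMinFold sc).keys.map (fun k => (k, (pvMinFold sc).getD k 0)) :=
    PySem.Dict.items_eq_map_keys (pvMinFold sc) hnd 0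
  have hfresh : ((pvMinFold sc).items.foldl (fun (d : PySem.Dict String (Int × Int)) kv =>
        d.insert kv.1 (kv.2, (pvMaxFold sc).getD kv.1 0)) PySem.Dict.empty).items
      = PySem.Dict.empty.items
        ++ (pvMinFold sc).items.map (fun kv => (kv.1, (kv.2, (pvMaxFold sc).getD kv.1 0))) :=
    PySem.Dict.items_foldl_insert_fresh _ _ _ _
      (fun a _ => PySem.Dict.contains_empty a.1)
      (by rw [show (pvMinFold sc).items.map (fun kv : String × Int => kv.1)
                = (pvMinFold sc).keys from rfl]
          exact hnd)
  rw [hfresh, hitems]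
  simp only [PySem.Dict.empty, List.nil_append, List.map_map, pvCanon, ← pvMin_keys]
  apply List.map_congr_left
  intro k hk
  have hmem : k ∈ sc.map (·.1) := by
    rw [pvMin_keys] at hk
    exact (PySem.Set.mem_ofList _ _).mp hk
  have hmin : (pvMinFold sc).getD k 0 = buscar_minimo (pvGrp k sc) := by
    rw [PySem.Dict.getD_eq_get?_getD, pvMin_get?, if_pos hmem]; rfl
  have hmax : (pvMaxFold sc).getD k 0 = buscar_maximo (pvGrp k sc) := by
    rw [PySem.Dict.getD_eq_get?_getD, pvMax_get?, if_pos hmem]; rfl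
  simp [Function.comp, hmin, hmax]

-- ===== VERDICT (by name: the statement is the Claim_ definition above) =====
theorem stock_productos_spec : Claim_equal_stock_productos := by
  intro sc _
  show stock_productos sc = stock_productos_alt sc
  rw [pvA_canon, pvB_canon]
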